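-- pv_equiv track=rewrite | github.com/weirdkidsima/penzGTU | Math/Alehina/3.py | create_relation_matrix
-- ===== SOURCE A (Python) =====
-- def create_relation_matrix(universe, relation):
--     # Создаем матрицу размером n x n, где n - количество элементов в универсуме
--     n = len(universe)
--     matrix = [[0] * n for _ in range(n)]
--     # Заполняем матрицу значениями 1, если пара (i, j) находится в отношении
--     for i in range(n):
--         for j in range(n):
--             if (universe[i], universe[j]) in relation:
--                 matrix[i][j] = 1
--     return matrix
-- ===== SOURCE B (Python) =====
-- def create_relation_matrix(universe, relation):
--     n = len(universe)
--     # index table: value -> list of all positions in universe (handles duplicates)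
--     positions = {}
--     for i in range(n):
--         positions.setdefault(universe[i], []).append(i)
--     matrix = [[0] * n for _ in range(n)]
--     # one pass over the relation instead of the n^2 membership scans
--     for a, b in relation:
--         if a in positions and b in positions:
--             for i in positions[a]:
--                 for j in positions[b]:
--                     matrix[i][j] = 1
--     return matrix
-- ===== Notes on version B (the rewrite author's own statement) =====
-- stated objective: faster
-- what changed: Replaces the n^2 membership scans over the relation list with a value-to-positions index built in one pass over the universe plus a single pass over the relation pairs that marks the affected cells directly.
import Mathlib
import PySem

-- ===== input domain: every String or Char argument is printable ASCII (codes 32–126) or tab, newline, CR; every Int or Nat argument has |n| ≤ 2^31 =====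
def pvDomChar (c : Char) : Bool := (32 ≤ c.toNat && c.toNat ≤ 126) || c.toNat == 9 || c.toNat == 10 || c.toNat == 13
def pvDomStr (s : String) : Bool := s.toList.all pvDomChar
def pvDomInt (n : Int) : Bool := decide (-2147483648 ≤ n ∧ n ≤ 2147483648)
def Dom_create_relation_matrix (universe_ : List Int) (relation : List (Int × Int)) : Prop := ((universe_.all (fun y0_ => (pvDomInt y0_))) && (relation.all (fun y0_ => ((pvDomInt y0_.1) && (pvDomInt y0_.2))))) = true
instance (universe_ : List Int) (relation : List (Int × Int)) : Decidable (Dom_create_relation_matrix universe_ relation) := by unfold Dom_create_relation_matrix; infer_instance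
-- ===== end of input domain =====

-- B replaces A's n^2 membership scans over the relation by a value→positions index plus one pass over the relation (objective: faster).

-- ===== PORT A =====
-- literal port of A: zero n×n matrix, then for i in range(n), for j in range(n),
-- set matrix[i][j] = 1 when (universe[i], universe[j]) ∈ relation.
-- universe[i] is ported as getD (index always in range since i < n = len(universe)).
def create_relation_matrix (universe_ : List Int) (relation : List (Int × Int)) : List (List Int) :=
  let n := universe_.length
  let matrix := (List.range n).map (fun _ => List.replicate n (0 : Int))
  (List.range n).foldl (fun m i =>
    (List.range n).foldl (fun m j =>
      if (universe_.getD i 0, universe_.getD j 0) ∈ relation then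
        m.set i ((m.getD i []).set j 1)
      else m) m) matrix

-- ===== PORT B =====
-- literal port of Source B: build positions (value → list of indices) with setdefault/append
-- (= insert of the appended list: insert keeps the key's position), zero matrix, then
-- for (a, b) in relation, if both keys present, set matrix[i][j] = 1 for i in positions[a], j in positions[b].
def create_relation_matrix_alt (universe_ : List Int) (relation : List (Int × Int)) : List (List Int) :=
  let n := universe_.length
  let positions : PySem.Dict Int (List Nat) :=
    (List.range n).foldl (fun d i =>
      d.insert (universe_.getD i 0) (d.getD (universe_.getD i 0) [] ++ [i])) PySem.Dict.empty
  let matrix := (List.range n).map (fun _ => List.replicate n (0 : Int))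
  relation.foldl (fun m p =>
    if positions.contains p.1 && positions.contains p.2 then
      (positions.getD p.1 []).foldl (fun m i =>
        (positions.getD p.2 []).foldl (fun m j =>
          m.set i ((m.getD i []).set j 1)) m) m
    else m) matrix

-- ===== PRECONDITION & SPEC =====
def Spec_create_relation_matrix (universe_ : List Int) (relation : List (Int × Int)) (out : List (List Int)) : Prop := out = create_relation_matrix_alt universe_ relation
instance (universe_ : List Int) (relation : List (Int × Int)) (out : List (List Int)) : Decidable (Spec_create_relation_matrix universe_ relation out) := by unfold Spec_create_relation_matrix; infer_instance

-- ===== CLAIM (what is proved, stated in full; the proofs are below) =====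
def Claim_equal_create_relation_matrix : Prop := ∀ (universe_ : List Int) (relation : List (Int × Int)), Dom_create_relation_matrix universe_ relation → Spec_create_relation_matrix universe_ relation (create_relation_matrix universe_ relation)

-- ===== LEMMAS AND PROOFS =====

-- an n×n matrix shape, and the (i,j) entry read the way both ports read it
def pvShape (n : Nat) (m : List (List Int)) : Prop := m.length = n ∧ ∀ r ∈ m, r.length = n

def pvEnt (m : List (List Int)) (i j : Nat) : Int := (m.getD i []).getD j 0

lemma pvShape_zero (n : Nat) : pvShape n ((List.range n).map (fun _ => List.replicate n (0 : Int))) := by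
  constructor
  · simp
  · intro r hr
    simp only [List.mem_map] at hr
    obtain ⟨_, _, rfl⟩ := hr
    simp

lemma pvEnt_zero (n : Nat) (i j : Nat) :
    pvEnt ((List.range n).map (fun _ => List.replicate n (0 : Int))) i j = 0 := by
  unfold pvEnt
  simp only [List.map_const', List.getD, List.getElem?_replicate]
  split
  · simp only [Option.getD_some, List.getElem?_replicate]
    split <;> rfl
  · rfl

lemma pvShape_set (n : Nat) (m : List (List Int)) (hm : pvShape n m) (i0 j0 : Nat) :
    pvShape n (m.set i0 ((m.getD i0 []).set j0 1)) := by
  obtain ⟨hlen, hrow⟩ := hm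
  by_cases hi0 : i0 < m.length
  · refine ⟨by simp [hlen], ?_⟩
    intro r hr
    rcases List.mem_or_eq_of_mem_set hr with hr' | rfl
    · exact hrow r hr'
    · rw [List.getD_eq_getElem _ _ hi0, List.length_set]
      exact hrow _ (List.getElem_mem hi0)
  · rw [List.set_eq_of_length_le (by omega)]
    exact ⟨hlen, hrow⟩

lemma pvGetD_set {α : Type} (m : List α) (x d : α) (i0 i : Nat) :
    (m.set i0 x).getD i d = if i0 = i ∧ i0 < m.length then x else m.getD i d := by
  simp only [List.getD_eq_getElem?_getD, List.getElem?_set]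
  by_cases h1 : i0 = i
  · subst h1
    by_cases h2 : i0 < m.length
    · simp [h2]
    · simp [h2]
  · simp [h1]

lemma pvEnt_set (n : Nat) (m : List (List Int)) (hm : pvShape n m) (i0 j0 i j : Nat)
    (hi : i < n) (hj : j < n) :
    pvEnt (m.set i0 ((m.getD i0 []).set j0 1)) i j
      = if (i0 == i) && (j0 == j) then 1 else pvEnt m i j := by
  obtain ⟨hlen, hrow⟩ := hm
  unfold pvEnt
  rw [pvGetD_set]
  by_cases hii : i0 = i
  · subst hii
    rw [if_pos ⟨rfl, by omega⟩, pvGetD_set]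
    have hrl : (m.getD i0 []).length = n := by
      rw [List.getD_eq_getElem _ _ (by omega)]
      exact hrow _ (List.getElem_mem (by omega))
    by_cases hjj : j0 = j
    · subst hjj
      rw [if_pos ⟨rfl, by omega⟩]
      simp
    · rw [if_neg (by tauto)]
      simp [hjj]
  · rw [if_neg (by tauto)]
    simp [hii]

-- generic loop lemma: a fold whose every step sets some entries to 1 and keeps the shape
lemma pvFoldEnt {β : Type} (n : Nat) (C : β → Nat → Nat → Bool)
    (F : List (List Int) → β → List (List Int))
    (hS : ∀ m b, pvShape n m → pvShape n (F m b))
    (hE : ∀ m b i j, pvShape n m → i < n → j < n →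
        pvEnt (F m b) i j = if C b i j then 1 else pvEnt m i j) :
    ∀ (L : List β) (m : List (List Int)), pvShape n m →
      pvShape n (L.foldl F m) ∧
      ∀ i j, i < n → j < n →
        pvEnt (L.foldl F m) i j = if L.any (fun b => C b i j) then 1 else pvEnt m i j := by
  intro L
  induction L with
  | nil => intro m hm; exact ⟨hm, fun _ _ _ _ => by simp⟩
  | cons b L ih =>
    intro m hm
    obtain ⟨hs, he⟩ := ih (F m b) (hS m b hm)
    refine ⟨hs, ?_⟩
    intro i j hi hj
    simp only [List.foldl_cons, List.any_cons]
    rw [he i j hi hj, hE m b i j hm hi hj]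
    by_cases h1 : C b i j <;> by_cases h2 : L.any (fun b => C b i j) <;> simp [h1, h2]

-- matrices with the same shape and the same entries are equal
lemma pvMatEq (n : Nat) (m1 m2 : List (List Int)) (h1 : pvShape n m1) (h2 : pvShape n m2)
    (h : ∀ i j, i < n → j < n → pvEnt m1 i j = pvEnt m2 i j) : m1 = m2 := by
  obtain ⟨hl1, hr1⟩ := h1
  obtain ⟨hl2, hr2⟩ := h2
  refine List.ext_getElem (by omega) ?_
  intro i hi _
  have hrow1 : m1[i].length = n := hr1 _ (List.getElem_mem hi)
  have hrow2 : m2[i].length = n := hr2 _ (List.getElem_mem (by omega))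
  refine List.ext_getElem (by omega) ?_
  intro j hj _
  have := h i j (by omega) (by omega)
  unfold pvEnt at this
  have e1 : m1.getD i [] = m1[i] := List.getD_eq_getElem _ _ (by omega)
  have e2 : m2.getD i [] = m2[i] := List.getD_eq_getElem _ _ (by omega)
  rw [e1, e2] at this
  rwa [List.getD_eq_getElem _ _ (by omega), List.getD_eq_getElem _ _ (by omega)] at this


-- the value → index-list table built by B's first loop, characterized by membership
lemma pvPos_mem (u : List Int) : ∀ (L : List Nat) (d : PySem.Dict Int (List Nat)) (v : Int) (k : Nat),
    k ∈ (L.foldl (fun d i => d.insert (u.getD i 0) (d.getD (u.getD i 0) [] ++ [i])) d).getD v []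
      ↔ k ∈ d.getD v [] ∨ (k ∈ L ∧ u.getD k 0 = v) := by
  intro L
  induction L with
  | nil => simp
  | cons a L ih =>
    intro d v k
    rw [List.foldl_cons, ih]
    by_cases hv : v = u.getD a 0
    · rw [hv, PySem.Dict.getD_insert_self]
      simp only [List.mem_append, List.mem_cons, List.not_mem_nil, or_false]
      constructor
      · rintro ((h | rfl) | ⟨hL, hP⟩)
        · exact Or.inl h
        · exact Or.inr ⟨Or.inl rfl, rfl⟩
        · exact Or.inr ⟨Or.inr hL, hP⟩
      · rintro (h | ⟨(rfl | hL), hP⟩)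
        · exact Or.inl (Or.inl h)
        · exact Or.inl (Or.inr rfl)
        · exact Or.inr ⟨hL, hP⟩
    · rw [PySem.Dict.getD_insert_of_ne _ _ _ hv]
      simp only [List.mem_cons]
      constructor
      · rintro (h | ⟨hL, hP⟩)
        · exact Or.inl h
        · exact Or.inr ⟨Or.inr hL, hP⟩
      · rintro (h | ⟨(rfl | hL), hP⟩)
        · exact Or.inl h
        · exact absurd hP.symm hv
        · exact Or.inr ⟨hL, hP⟩

-- A's double loop: entry (i, j) is 1 exactly when (universe[i], universe[j]) ∈ relation
lemma pvA_char (u : List Int) (rel : List (Int × Int)) :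
    pvShape u.length (create_relation_matrix u rel) ∧
    ∀ i j, i < u.length → j < u.length →
      pvEnt (create_relation_matrix u rel) i j
        = if (u.getD i 0, u.getD j 0) ∈ rel then 1 else 0 := by
  have hinner : ∀ (i : Nat) (m : List (List Int)), pvShape u.length m →
      pvShape u.length ((List.range u.length).foldl (fun m j =>
        if (u.getD i 0, u.getD j 0) ∈ rel then m.set i ((m.getD i []).set j 1) else m) m) ∧
      ∀ i' j', i' < u.length → j' < u.length →
        pvEnt ((List.range u.length).foldl (fun m j =>
          if (u.getD i 0, u.getD j 0) ∈ rel then m.set i ((m.getD i []).set j 1) else m) m) i' j'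
          = if (List.range u.length).any
                (fun j0 => (i == i') && (j0 == j') && decide ((u.getD i 0, u.getD j0 0) ∈ rel))
            then 1 else pvEnt m i' j' := fun i =>
    pvFoldEnt u.length
      (fun j0 i' j' => (i == i') && (j0 == j') && decide ((u.getD i 0, u.getD j0 0) ∈ rel)) _
      (fun m j0 hm => by
        by_cases hmem : (u.getD i 0, u.getD j0 0) ∈ rel
        · rw [if_pos hmem]; exact pvShape_set u.length m hm i j0
        · rw [if_neg hmem]; exact hm)
      (fun m j0 i' j' hm hi' hj' => by
        by_cases hmem : (u.getD i 0, u.getD j0 0) ∈ rel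
        · rw [if_pos hmem, pvEnt_set u.length m hm i j0 i' j' hi' hj']
          simp only [decide_eq_true hmem, Bool.and_true]
        · rw [if_neg hmem]
          simp only [decide_eq_false hmem, Bool.and_false]
          simp)
      (List.range u.length)
  have houter := pvFoldEnt u.length
      (fun i0 i' j' => (i0 == i') && decide ((u.getD i' 0, u.getD j' 0) ∈ rel))
      (fun m i => (List.range u.length).foldl (fun m j =>
        if (u.getD i 0, u.getD j 0) ∈ rel then m.set i ((m.getD i []).set j 1) else m) m)
      (fun m i hm => (hinner i m hm).1)
      (fun m i i' j' hm hi' hj' => by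
        rw [(hinner i m hm).2 i' j' hi' hj']
        have hb : ((List.range u.length).any
              (fun j0 => (i == i') && (j0 == j') && decide ((u.getD i 0, u.getD j0 0) ∈ rel)))
            = ((i == i') && decide ((u.getD i' 0, u.getD j' 0) ∈ rel)) := by
          apply Bool.eq_iff_iff.mpr
          simp only [List.any_eq_true, List.mem_range, Bool.and_eq_true, beq_iff_eq,
            decide_eq_true_eq]
          constructor
          · rintro ⟨j0, hj0, ⟨⟨rfl, rfl⟩, hmem⟩⟩
            exact ⟨rfl, hmem⟩
          · rintro ⟨rfl, hmem⟩
            exact ⟨j', hj', ⟨rfl, rfl⟩, hmem⟩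
        rw [hb])
      (List.range u.length)
      ((List.range u.length).map fun _ => List.replicate u.length (0 : Int)) (pvShape_zero u.length)
  have hdef : create_relation_matrix u rel
      = (List.range u.length).foldl (fun m i => (List.range u.length).foldl (fun m j =>
          if (u.getD i 0, u.getD j 0) ∈ rel then m.set i ((m.getD i []).set j 1) else m) m)
        ((List.range u.length).map fun _ => List.replicate u.length (0 : Int)) := rfl
  rw [hdef]
  refine ⟨houter.1, ?_⟩
  intro i j hi hj
  rw [houter.2 i j hi hj, pvEnt_zero]
  have hb : ((List.range u.length).any
        (fun i0 => (i0 == i) && decide ((u.getD i 0, u.getD j 0) ∈ rel)))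
      = decide ((u.getD i 0, u.getD j 0) ∈ rel) := by
    apply Bool.eq_iff_iff.mpr
    simp only [List.any_eq_true, List.mem_range, Bool.and_eq_true, beq_iff_eq, decide_eq_true_eq]
    constructor
    · rintro ⟨i0, _, rfl, hmem⟩
      exact hmem
    · intro hmem
      exact ⟨i, hi, rfl, hmem⟩
  simp only [hb, decide_eq_true_eq]

-- B's passes: the same entries end up 1
lemma pvB_char (u : List Int) (rel : List (Int × Int)) :
    pvShape u.length (create_relation_matrix_alt u rel) ∧
    ∀ i j, i < u.length → j < u.length →
      pvEnt (create_relation_matrix_alt u rel) i j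
        = if (u.getD i 0, u.getD j 0) ∈ rel then 1 else 0 := by
  set pos := (List.range u.length).foldl (fun d i =>
      d.insert (u.getD i 0) (d.getD (u.getD i 0) [] ++ [i])) (PySem.Dict.empty) with hpos
  have hmem_pos : ∀ (v : Int) (k : Nat), k ∈ pos.getD v [] ↔ (k < u.length ∧ u.getD k 0 = v) := by
    intro v k
    rw [hpos, pvPos_mem]
    simp [pysem, List.mem_range]
  -- innermost loop: set row i0 at every j0 ∈ js
  have hin : ∀ (js : List Nat) (i0 : Nat) (m : List (List Int)), pvShape u.length m →
      pvShape u.length (js.foldl (fun m j0 => m.set i0 ((m.getD i0 []).set j0 1)) m) ∧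
      ∀ i' j', i' < u.length → j' < u.length →
        pvEnt (js.foldl (fun m j0 => m.set i0 ((m.getD i0 []).set j0 1)) m) i' j'
          = if js.any (fun j0 => (i0 == i') && (j0 == j')) then 1 else pvEnt m i' j' :=
    fun js i0 =>
      pvFoldEnt u.length (fun j0 i' j' => (i0 == i') && (j0 == j')) _
        (fun m j0 hm => pvShape_set u.length m hm i0 j0)
        (fun m j0 i' j' hm hi' hj' => pvEnt_set u.length m hm i0 j0 i' j' hi' hj') js
  -- middle loop: over i0 ∈ is
  have hmid : ∀ (is js : List Nat) (m : List (List Int)), pvShape u.length m →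
      pvShape u.length (is.foldl (fun m i0 =>
        js.foldl (fun m j0 => m.set i0 ((m.getD i0 []).set j0 1)) m) m) ∧
      ∀ i' j', i' < u.length → j' < u.length →
        pvEnt (is.foldl (fun m i0 =>
            js.foldl (fun m j0 => m.set i0 ((m.getD i0 []).set j0 1)) m) m) i' j'
          = if is.any (fun i0 => (i0 == i') && js.any (fun j0 => j0 == j'))
            then 1 else pvEnt m i' j' :=
    fun is js =>
      pvFoldEnt u.length (fun i0 i' j' => (i0 == i') && js.any (fun j0 => j0 == j')) _
        (fun m i0 hm => (hin js i0 m hm).1)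
        (fun m i0 i' j' hm hi' hj' => by
          rw [(hin js i0 m hm).2 i' j' hi' hj']
          have hb : (js.any fun j0 => (i0 == i') && (j0 == j'))
              = ((i0 == i') && js.any (fun j0 => j0 == j')) := by
            cases (i0 == i') <;> simp
          rw [hb]) is
  -- outer loop: over the relation pairs
  have hfold := pvFoldEnt u.length
      (fun (p : Int × Int) i' j' =>
        (pos.getD p.1 []).any (fun i0 => i0 == i') && (pos.getD p.2 []).any (fun j0 => j0 == j'))
      (fun m p => if pos.contains p.1 && pos.contains p.2 then
        (pos.getD p.1 []).foldl (fun m i =>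
          (pos.getD p.2 []).foldl (fun m j => m.set i ((m.getD i []).set j 1)) m) m
        else m)
      (fun m p hm => by
        beta_reduce
        by_cases hg : (pos.contains p.1 && pos.contains p.2) = true
        · rw [if_pos hg]
          exact (hmid (pos.getD p.1 []) (pos.getD p.2 []) m hm).1
        · rw [if_neg hg]
          exact hm)
      (fun m p i' j' hm hi' hj' => by
        beta_reduce
        by_cases hg : (pos.contains p.1 && pos.contains p.2) = true
        · rw [if_pos hg, (hmid (pos.getD p.1 []) (pos.getD p.2 []) m hm).2 i' j' hi' hj']
          have hb : ((pos.getD p.1 []).any fun i0 =>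
                (i0 == i') && (pos.getD p.2 []).any (fun j0 => j0 == j'))
              = ((pos.getD p.1 []).any (fun i0 => i0 == i')
                  && (pos.getD p.2 []).any (fun j0 => j0 == j')) := by
            cases ((pos.getD p.2 []).any (fun j0 => j0 == j')) <;> simp
          rw [hb]
        · rw [if_neg hg]
          have hb : ((pos.getD p.1 []).any (fun i0 => i0 == i')
              && (pos.getD p.2 []).any (fun j0 => j0 == j')) = false := by
            cases hc1 : pos.contains p.1 with
            | false =>
                rw [PySem.Dict.getD_of_not_contains _ _ hc1]
                simp
            | true =>
                cases hc2 : pos.contains p.2 with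
                | false =>
                    rw [PySem.Dict.getD_of_not_contains _ _ hc2]
                    simp
                | true => exact absurd (by rw [hc1, hc2]; rfl) hg
          simp only [hb]
          simp)
      rel ((List.range u.length).map fun _ => List.replicate u.length (0 : Int))
      (pvShape_zero u.length)
  have hdef : create_relation_matrix_alt u rel
      = rel.foldl (fun m p => if pos.contains p.1 && pos.contains p.2 then
          (pos.getD p.1 []).foldl (fun m i =>
            (pos.getD p.2 []).foldl (fun m j => m.set i ((m.getD i []).set j 1)) m) m
          else m)
        ((List.range u.length).map fun _ => List.replicate u.length (0 : Int)) := rfl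
  rw [hdef]
  refine ⟨hfold.1, ?_⟩
  intro i j hi hj
  rw [hfold.2 i j hi hj, pvEnt_zero]
  have hb : (rel.any fun p =>
        (pos.getD p.1 []).any (fun i0 => i0 == i) && (pos.getD p.2 []).any (fun j0 => j0 == j))
      = decide ((u.getD i 0, u.getD j 0) ∈ rel) := by
    apply Bool.eq_iff_iff.mpr
    simp only [List.any_eq_true, Bool.and_eq_true, beq_iff_eq, decide_eq_true_eq]
    constructor
    · rintro ⟨p, hp, ⟨i0, hi0, rfl⟩, ⟨j0, hj0, rfl⟩⟩
      have h1 := (hmem_pos p.1 i0).mp hi0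
      have h2 := (hmem_pos p.2 j0).mp hj0
      have hpp : p = (u.getD i0 0, u.getD j0 0) := by
        cases p
        simp only [Prod.mk.injEq]
        exact ⟨h1.2.symm, h2.2.symm⟩
      rwa [← hpp]
    · intro hmem
      exact ⟨(u.getD i 0, u.getD j 0), hmem,
        ⟨i, (hmem_pos _ i).mpr ⟨hi, rfl⟩, rfl⟩, ⟨j, (hmem_pos _ j).mpr ⟨hj, rfl⟩, rfl⟩⟩
  simp only [hb, decide_eq_true_eq]

-- ===== VERDICT (by name: the statement is the Claim_ definition above) =====
theorem create_relation_matrix_spec : Claim_equal_create_relation_matrix := by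
  intro u rel _
  unfold Spec_create_relation_matrix
  obtain ⟨hsA, heA⟩ := pvA_char u rel
  obtain ⟨hsB, heB⟩ := pvB_char u rel
  exact pvMatEq u.length _ _ hsA hsB
    (fun i j hi hj => by rw [heA i j hi hj, heB i j hi hj])
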